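-- pv_equiv track=rewrite | github.com/HenrryHernandez/base64Encription | base64.py | difineBytes
-- ===== SOURCE A (Python) =====
-- def difineGroupsInBytesOf3(bytesArr): #ESTA FUNCION NOS AYUDA A SEPARA LOS GRUPOS DE 3 BYTES EN 6 BITS ADEMAS DE EVALUAR EL CASO EN DONDE NO HAYAN GRUPOS DE
-- 									#BYTES QUE SEAN MULTIPLO DE 3
-- 	bytesEnTres = []
-- 	seises = len(bytesArr[len(bytesArr) - 1]) // 6
-- 	if seises != 4:
-- 		if len(bytesArr[len(bytesArr) - 1]) - 6 * seises != 0: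
-- 			for i in range(len(bytesArr[len(bytesArr) - 1]), 6 * (seises + 1)):
-- 				bytesArr[len(bytesArr) - 1].append("0")
-- 		seises = len(bytesArr[len(bytesArr) - 1])
--
-- 	for i in range(seises, 24): #en caso de que no haya multiplos de 3 exactos en la cantidad de los grupos de bytes, usaremos el '@' de comodin, lo usaremos
-- 								#por que su ascii es base64 el caracter 65 ('=') nos ayuda cuando no son multiplos de 3 la cantidad de grupos de 3 bytes
-- 		bytesArr[len(bytesArr) - 1].append("@")
--
-- 	for i in range(len(bytesArr)):
-- 		bytesEnTres.append([])
--
-- 		for j in range(4):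
-- 			bytesEnTres[i].append("")
-- 			for k in range(6):
-- 				bytesEnTres[i][j] += bytesArr[i][j * 6 + k]
--
-- 	return bytesEnTres
--
-- def difineBytes(bits): #UNO DE LOS PASOS PARA ENCRIPTAR ES SEPARAR LOS BITS QUE COMPONEN UNA PALABRA EN GRUPOS DE 3 BYTES O 24 BITS, EN ESTA FUNCION LO HACEMOS,
-- 						#PERO AUN NO SEPARAMOS EN 6 BITS LOS GRUPOS 24 BITS (3 BYTES) Y TAMPOCO HEMOS EVALUADO LA POSIBILIDAD EN DONDE NO SE CUMPLA QUE LA CANTIDAD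
-- 						#DE GRUPOS DE 3 BYTES QUE HAYA SEA MULTIPLO DE 3
-- 	veinticuatros = len(bits) // 24
-- 	sobrantes = len(bits) - 24 * veinticuatros
-- 	bytess = []
--
-- 	for i in range(veinticuatros):
-- 		bytess.append([])
-- 		for j in range(24):
-- 			bytess[i].append(bits[i * 24 + j])
--
--
-- 	bytess.append([])
-- 	for i in range(veinticuatros * 24, len(bits)):
-- 		bytess[veinticuatros].append(bits[i])
--
-- 	if len(bytess[veinticuatros]) == 0:
-- 		del bytess[veinticuatros]
--
-- 	bytess = difineGroupsInBytesOf3(bytess) #EL LLAMADO A ESTA FUNCION NOS AYUDARA CON EL PROBLEMA ANTERIOR MENCIONADO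
-- 	return bytess
-- ===== SOURCE B (Python) =====
-- def difineBytes(bits):
--     n = len(bits)
--     rem = n % 24
--     if rem:
--         zeros = -rem % 6
--         padded = bits + ["0"] * zeros + ["@"] * (24 - rem - zeros)
--     else:
--         padded = list(bits)
--     return [["".join(padded[i + j : i + j + 6]) for j in range(0, 24, 6)]
--             for i in range(0, len(padded), 24)]
-- ===== Notes on version B (the rewrite author's own statement) =====
-- stated objective: simpler
-- what changed: A chunks the bit list into 24-element sub-lists, mutates the last chunk with two padding loops inside a helper, and rebuilds 6-element strings with three nested index loops; B pads the flat list once ('0' to a multiple of 6, then '@' to 24) and emits each 24-element window as four 6-element joins in a single comprehension. (single pass over a flat padded list, no per-chunk list building)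
import Mathlib
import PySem

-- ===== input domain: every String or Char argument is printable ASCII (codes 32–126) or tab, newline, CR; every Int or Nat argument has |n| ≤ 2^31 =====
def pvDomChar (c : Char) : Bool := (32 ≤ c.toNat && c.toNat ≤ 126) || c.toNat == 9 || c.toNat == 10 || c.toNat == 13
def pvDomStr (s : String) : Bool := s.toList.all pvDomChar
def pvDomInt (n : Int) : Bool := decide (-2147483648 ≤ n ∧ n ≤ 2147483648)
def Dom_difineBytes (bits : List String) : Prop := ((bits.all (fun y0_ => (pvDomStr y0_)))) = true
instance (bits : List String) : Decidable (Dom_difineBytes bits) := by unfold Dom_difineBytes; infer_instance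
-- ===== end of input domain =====

-- B replaces A's two-phase chunk-then-pad-last list-of-lists construction by padding the whole
-- flat list once and uniformly slicing 24-element windows into four 6-element joins (objective: simpler).
-- Pre_ excludes only the empty list, on which A raises IndexError (bytesArr[-1] of an empty list); B returns [].


-- ===== PORT A =====
-- Literal transliteration of difineGroupsInBytesOf3.  Python mutates bytesArr[-1] in place;
-- here the mutated last row is threaded explicitly (dropLast ++ [last]).  bytesArr[len-1] on an
-- empty list raises IndexError in Python: pyGetD's default [] is never used inside Pre_.
def difineGroupsInBytesOf3 (bytesArr : List (List String)) : List (List String) :=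
  let last0 := PySem.List.pyGetD bytesArr ((bytesArr.length : Int) - 1) []
  let seises : Int := PySem.Int.floordiv (last0.length : Int) 6
  -- if seises != 4: (pad with "0" to a multiple of 6, then seises = new length)
  let p : List String × Int :=
    if seises ≠ 4 then
      let last1 :=
        if (last0.length : Int) - 6 * seises ≠ 0 then
          (PySem.List.pyRange (last0.length : Int) (6 * (seises + 1)) 1).foldl
            (fun l _ => l ++ ["0"]) last0
        else last0
      (last1, (last1.length : Int))
    else (last0, seises)
  -- for i in range(seises, 24): append "@"
  let last2 := (PySem.List.pyRange p.2 24 1).foldl (fun l _ => l ++ ["@"]) p.1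
  let arr := bytesArr.dropLast ++ [last2]
  -- bytesEnTres: for i: for j in range(4): string built by += over k in range(6)
  (PySem.List.pyRange 0 (arr.length : Int) 1).foldl
    (fun acc i =>
      acc ++ [(PySem.List.pyRange 0 4 1).foldl
        (fun row j =>
          row ++ [(PySem.List.pyRange 0 6 1).foldl
            (fun s k => s ++ PySem.List.pyGetD (PySem.List.pyGetD arr i []) (j * 6 + k) "")
            ""])
        []])
    []

def difineBytes (bits : List String) : List (List String) :=
  let veinticuatros : Int := PySem.Int.floordiv (bits.length : Int) 24
  -- sobrantes is computed by A but never used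
  let bytess : List (List String) :=
    (PySem.List.pyRange 0 veinticuatros 1).foldl
      (fun acc i =>
        acc ++ [(PySem.List.pyRange 0 24 1).foldl
          (fun row j => row ++ [PySem.List.pyGetD bits (i * 24 + j) ""]) []])
      []
  let last := (PySem.List.pyRange (veinticuatros * 24) (bits.length : Int) 1).foldl
    (fun row i => row ++ [PySem.List.pyGetD bits i ""]) []
  let bytess := bytess ++ [last]
  -- if len(bytess[veinticuatros]) == 0: del bytess[veinticuatros]   (the last element)
  let bytess := if last.length = 0 then bytess.dropLast else bytess
  difineGroupsInBytesOf3 bytess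

-- ===== PORT B =====
def difineBytes_alt (bits : List String) : List (List String) :=
  let n : Int := (bits.length : Int)
  let rem : Int := PySem.Int.mod n 24
  let zeros : Int := PySem.Int.mod (-rem) 6
  let padded : List String :=
    if rem ≠ 0 then
      bits ++ List.replicate zeros.toNat "0" ++ List.replicate (24 - rem - zeros).toNat "@"
    else bits
  (PySem.List.pyRange 0 (padded.length : Int) 24).map
    (fun i =>
      (PySem.List.pyRange 0 24 6).map
        (fun j => PySem.Str.join "" (PySem.List.slice padded (some (i + j)) (some (i + j + 6)))))

-- ===== PRECONDITION & SPEC =====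
-- Pre_ excludes only the empty input, on which A raises IndexError.
def Pre_difineBytes (bits : List String) : Prop := bits ≠ []
instance (bits : List String) : Decidable (Pre_difineBytes bits) := by unfold Pre_difineBytes; infer_instance
def pvWitness_difineBytes : List String := ["1", "0", "1"]

def Spec_difineBytes (bits : List String) (out : List (List String)) : Prop := out = difineBytes_alt bits
instance (bits : List String) (out : List (List String)) : Decidable (Spec_difineBytes bits out) := by unfold Spec_difineBytes; infer_instance

-- ===== CLAIM (what is proved, stated in full; the proofs are below) =====
def Claim_equal_difineBytes : Prop := ∀ (bits : List String), Dom_difineBytes bits → Pre_difineBytes bits → Spec_difineBytes bits (difineBytes bits)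


-- ===== LEMMAS AND PROOFS =====
-- zeros of "0"-padding for a remainder r = len % 24 ≠ 0
def pvZ (r : Nat) : Nat := (6 - r % 6) % 6
-- the fully padded flat list (common to both ports' observable behaviour)
def pvPad (bits : List String) : List String :=
  if bits.length % 24 = 0 then bits
  else bits ++ List.replicate (pvZ (bits.length % 24)) "0"
            ++ List.replicate (24 - bits.length % 24 - pvZ (bits.length % 24)) "@"
def pvQ (bits : List String) : Nat :=
  bits.length / 24 + (if bits.length % 24 = 0 then 0 else 1)
-- the 6-element window string starting at t
def pvW (P : List String) (t : Nat) : String :=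
  PySem.Str.join "" ((List.range 6).map (fun k => P.getD (t + k) ""))
-- the canonical common value of both ports
def pvCanon (P : List String) (q : Nat) : List (List String) :=
  (List.range q).map (fun i => [pvW P (24*i), pvW P (24*i+6), pvW P (24*i+12), pvW P (24*i+18)])

theorem pvPad_length (bits : List String) : (pvPad bits).length = 24 * pvQ bits := by
  unfold pvPad pvQ pvZ
  split_ifs with h <;> simp <;> omega

theorem pvJoinNil (L : List (List Char)) : PySem.Chars.join [] L = L.flatten := by
  show List.intercalate [] L = L.flatten
  unfold List.intercalate
  induction L with
  | nil => rfl
  | cons a l ih =>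
    cases l with
    | nil => simp
    | cons b t => rw [List.intersperse_cons₂]; simp_all

theorem pvJoin6 (a b c d e f : String) :
    PySem.Str.join "" [a,b,c,d,e,f] = "" ++ a ++ b ++ c ++ d ++ e ++ f := by
  apply String.toList_inj.mp
  simp [PySem.Str.toList_join, pvJoinNil, String.toList_append]

theorem pvDropTakeMap {α : Type} (l : List α) (d : α) (t m : Nat) (h : t + m ≤ l.length) :
    (l.drop t).take m = (List.range m).map (fun k => l.getD (t + k) d) := by
  apply List.ext_getElem
  · simp; omega
  · intro i h1 h2
    simp only [List.getElem_take, List.getElem_drop, List.getElem_map, List.getElem_range]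
    rw [List.getD_eq_getElem l d (by simp at h1 h2 ⊢; omega)]

theorem pvRangeOne (a b : Nat) (h : a ≤ b) :
    PySem.List.pyRange (a : Int) (b : Int) 1
      = (List.range (b - a)).map (fun k => ((a + k : Nat) : Int)) := by
  rw [PySem.List.pyRange_of_pos _ _ (by norm_num)]
  rcases Nat.eq_or_lt_of_le h with h' | h'
  · subst h'; simp
  · rw [if_pos (by exact_mod_cast h')]
    have hc : ((↑b - ↑a + 1 - 1 : Int) / 1).toNat = b - a := by omega
    rw [hc]
    apply List.map_congr_left; intro k hk; push_cast; ring

theorem pvSliceW (P : List String) (a : Int) (t : Nat) (ha : a = (t : Int))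
    (ht : t + 6 ≤ P.length) :
    PySem.Str.join "" (PySem.List.slice P (some a) (some (a + 6))) = pvW P t := by
  subst ha
  rw [show ((t : Int) + 6) = ((t + 6 : Nat) : Int) by push_cast; ring,
    PySem.List.slice_natCast, show t + 6 - t = 6 by omega,
    pvDropTakeMap P "" t 6 ht]
  rfl

theorem pvWindows (P : List String) (q : Nat) (hlen : P.length = 24 * q) :
    (PySem.List.pyRange 0 (P.length : Int) 24).map
      (fun i => (PySem.List.pyRange 0 24 6).map
        (fun j => PySem.Str.join "" (PySem.List.slice P (some (i + j)) (some (i + j + 6)))))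
      = pvCanon P q := by
  rw [PySem.List.pyRange_of_pos _ _ (by norm_num : (0:Int) < 24)]
  have hc : (if (0:Int) < (P.length : Int) then (((P.length : Int) - 0 + 24 - 1) / 24).toNat else 0) = q := by
    split_ifs with h0 <;> omega
  rw [hc, List.map_map]
  unfold pvCanon
  apply List.map_congr_left
  intro k hk
  simp only [List.mem_range] at hk
  rw [show PySem.List.pyRange 0 24 6 = [0, 6, 12, 18] from rfl]
  simp only [Function.comp, List.map]
  rw [pvSliceW P _ (24*k) (by push_cast; ring) (by omega),
    pvSliceW P _ (24*k+6) (by push_cast; ring) (by omega),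
    pvSliceW P _ (24*k+12) (by push_cast; ring) (by omega),
    pvSliceW P _ (24*k+18) (by push_cast; ring) (by omega)]

theorem pvAltEq (bits : List String) :
    difineBytes_alt bits = pvCanon (pvPad bits) (pvQ bits) := by
  have hm : PySem.Int.mod ((bits.length : Int)) 24 = ((bits.length % 24 : Nat) : Int) := by
    exact_mod_cast PySem.Int.mod_natCast bits.length 24
  by_cases hr : bits.length % 24 = 0
  · have hpad : pvPad bits = bits := by unfold pvPad; rw [if_pos hr]
    have hq : bits.length = 24 * pvQ bits := by
      unfold pvQ; rw [if_pos hr]; omega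
    simp only [difineBytes_alt, hm]
    rw [if_neg (by simp [hr])]
    rw [pvWindows bits (pvQ bits) hq, hpad]
  · have hz : (PySem.Int.mod (-((bits.length % 24 : Nat) : Int)) 6).toNat = pvZ (bits.length % 24) := by
      rw [PySem.Int.mod_eq_emod_of_pos (by norm_num)]
      unfold pvZ
      omega
    have hw : ((24 : Int) - ((bits.length % 24 : Nat) : Int) - PySem.Int.mod (-((bits.length % 24 : Nat) : Int)) 6).toNat
        = 24 - bits.length % 24 - pvZ (bits.length % 24) := by
      rw [PySem.Int.mod_eq_emod_of_pos (by norm_num)]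
      unfold pvZ
      omega
    have hpad : pvPad bits = bits ++ List.replicate (PySem.Int.mod (-((bits.length % 24 : Nat) : Int)) 6).toNat "0"
        ++ List.replicate (((24 : Int) - ((bits.length % 24 : Nat) : Int) - PySem.Int.mod (-((bits.length % 24 : Nat) : Int)) 6).toNat) "@" := by
      unfold pvPad
      rw [if_neg hr, hz, hw]
    simp only [difineBytes_alt, hm]
    rw [if_pos (by exact_mod_cast hr), ← hpad]
    exact pvWindows (pvPad bits) (pvQ bits) (pvPad_length bits)

theorem pvCat6 (P : List String) (t : Nat) :
    pvW P t = "" ++ P.getD (t+0) "" ++ P.getD (t+1) "" ++ P.getD (t+2) ""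
      ++ P.getD (t+3) "" ++ P.getD (t+4) "" ++ P.getD (t+5) "" := by
  unfold pvW
  rw [show List.range 6 = [0,1,2,3,4,5] from rfl]
  simp only [List.map]
  rw [pvJoin6]

theorem pvFoldConst (ks : List Int) (l : List String) (x : String) :
    ks.foldl (fun l _ => l ++ [x]) l = l ++ List.replicate ks.length x := by
  simp [List.map_const']

-- the final three nested loops of difineGroupsInBytesOf3, characterised elementwise
theorem pvRowsEq (arr : List (List String)) (P : List String) (q : Nat)
    (helem : ∀ i < q, ∀ m < 24, (arr[i]?.getD [])[m]?.getD "" = P.getD (24*i+m) "") :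
    (PySem.List.pyRange 0 ((q : Nat) : Int) 1).foldl
      (fun acc i =>
        acc ++ [(PySem.List.pyRange 0 4 1).foldl
          (fun row j =>
            row ++ [(PySem.List.pyRange 0 6 1).foldl
              (fun s k => s ++ PySem.List.pyGetD (PySem.List.pyGetD arr i []) (j * 6 + k) "")
              ""])
          []])
      [] = pvCanon P q := by
  rw [PySem.List.pyRange_zero_natCast, PySem.List.foldl_append_singleton_eq_map,
    List.map_map, List.nil_append]
  unfold pvCanon
  apply List.map_congr_left
  intro i hi
  simp only [List.mem_range] at hi
  simp only [Function.comp]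
  rw [show PySem.List.pyRange 0 4 1 = [0,1,2,3] from rfl,
    PySem.List.foldl_append_singleton_eq_map, List.nil_append,
    show PySem.List.pyRange 0 6 1 = [0,1,2,3,4,5] from rfl]
  simp only [List.map, List.foldl, PySem.List.pyGetD_natCast]
  norm_num [PySem.List.pyGetD_ofNat']
  rw [pvCat6, pvCat6, pvCat6, pvCat6,
    helem i hi 0 (by norm_num), helem i hi 1 (by norm_num), helem i hi 2 (by norm_num),
    helem i hi 3 (by norm_num), helem i hi 4 (by norm_num), helem i hi 5 (by norm_num),
    helem i hi 6 (by norm_num), helem i hi 7 (by norm_num), helem i hi 8 (by norm_num),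
    helem i hi 9 (by norm_num), helem i hi 10 (by norm_num), helem i hi 11 (by norm_num),
    helem i hi 12 (by norm_num), helem i hi 13 (by norm_num), helem i hi 14 (by norm_num),
    helem i hi 15 (by norm_num), helem i hi 16 (by norm_num), helem i hi 17 (by norm_num),
    helem i hi 18 (by norm_num), helem i hi 19 (by norm_num), helem i hi 20 (by norm_num),
    helem i hi 21 (by norm_num), helem i hi 22 (by norm_num), helem i hi 23 (by norm_num)]
  simp [Nat.add_assoc]

-- the P-side lookup below 24*(len/24) is a plain bits lookup
theorem pvPadLow (bits : List String) (k : Nat) (hk : k < bits.length) :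
    (pvPad bits).getD k "" = bits.getD k "" := by
  unfold pvPad
  split_ifs with h0
  · rfl
  · rw [List.append_assoc, List.getD_append _ _ _ k hk]

-- the common tail step for a non-multiple-of-24 input, once last2 is known to be P.drop (24q)
theorem pvFinal (bits : List String) (last2 : List String)
    (hr : bits.length % 24 ≠ 0)
    (hl2 : last2 = (pvPad bits).drop (24 * (bits.length / 24))) :
    (PySem.List.pyRange 0 ((pvQ bits : Nat) : Int) 1).foldl
      (fun acc i =>
        acc ++ [(PySem.List.pyRange 0 4 1).foldl
          (fun row j =>
            row ++ [(PySem.List.pyRange 0 6 1).foldl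
              (fun s k => s ++ PySem.List.pyGetD
                (PySem.List.pyGetD
                  ((List.range (bits.length / 24)).map
                    (fun x => (List.range 24).map (fun j => bits.getD (x*24 + j) "")) ++ [last2]) i [])
                (j * 6 + k) "") ""]) []]) []
      = pvCanon (pvPad bits) (pvQ bits) := by
  have hq' : pvQ bits = bits.length / 24 + 1 := by unfold pvQ; rw [if_neg hr]
  apply pvRowsEq
  intro i hi m hm
  rw [hq'] at hi
  by_cases hiq : i < bits.length / 24
  · rw [List.getElem?_append_left (by simpa using hiq)]
    simp only [List.getElem?_map, List.getElem?_range, hiq, Option.map_some,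
      Option.getD_some]
    rw [List.getElem?_range hm]
    simp only [Option.map_some, Option.getD_some]
    rw [pvPadLow bits (24 * i + m) (by omega), Nat.mul_comm]
  · have hieq : i = bits.length / 24 := by omega
    subst hieq
    rw [List.getElem?_append_right (by simp), hl2]
    simp only [List.length_map, List.length_range, Nat.sub_self, List.getElem?_cons_zero,
      Option.getD_some]
    rw [show (List.drop (24 * (bits.length / 24)) (pvPad bits))[m]? = (pvPad bits)[24 * (bits.length / 24) + m]? from List.getElem?_drop]
    rfl

theorem pvAEq (bits : List String) (h : bits ≠ []) :
    difineBytes bits = pvCanon (pvPad bits) (pvQ bits) := by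
  have hn0 : bits.length ≠ 0 := by simpa using h
  have hq24 : PySem.Int.floordiv ((bits.length : Int)) 24 = ((bits.length / 24 : Nat) : Int) := by
    exact_mod_cast PySem.Int.floordiv_natCast bits.length 24
  have h24r : PySem.List.pyRange 0 (24 : Int) 1 = (List.range 24).map (fun k => ((k : Nat) : Int)) := by
    rw [show (24:Int) = ((24:Nat):Int) by norm_num, PySem.List.pyRange_zero_natCast]
  have hR : PySem.List.pyRange (((bits.length / 24 : Nat) : Int) * 24) ((bits.length : Nat) : Int) 1
      = (List.range (bits.length - bits.length / 24 * 24)).map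
          (fun k => ((bits.length / 24 * 24 + k : Nat) : Int)) := by
    rw [show (((bits.length / 24 : Nat) : Int) * 24) = ((bits.length / 24 * 24 : Nat) : Int) by
          push_cast; ring]
    exact pvRangeOne _ _ (by omega)
  have hIdx : ∀ (i j : Nat), PySem.List.pyGetD bits (((i : Nat) : Int) * 24 + ((j : Nat) : Int)) ""
      = bits.getD (i * 24 + j) "" := by
    intro i j
    rw [show (((i:Nat):Int) * 24 + ((j:Nat):Int)) = ((i*24+j : Nat) : Int) by push_cast; ring,
      PySem.List.pyGetD_natCast]
  simp only [difineBytes, hq24, h24r, hR, PySem.List.pyRange_zero_natCast,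
    PySem.List.foldl_append_singleton_eq_map, List.nil_append, List.map_map, Function.comp_def,
    hIdx, PySem.List.pyGetD_natCast]
  by_cases hr : bits.length % 24 = 0
  · -- the partial chunk is empty and gets deleted
    rw [show bits.length - bits.length / 24 * 24 = 0 from by omega]
    simp only [List.range_zero, List.map_nil, List.length_nil, List.dropLast_concat]
    simp only [difineGroupsInBytesOf3, if_true]
    rw [show ((List.map (fun x => List.map (fun x_1 => bits.getD (x * 24 + x_1) "") (List.range 24))
          (List.range (bits.length / 24))).length) = bits.length / 24 from by simp]
    rw [show ((bits.length / 24 : Nat) : Int) - 1 = ((bits.length / 24 - 1 : Nat) : Int) from by omega]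
    simp only [PySem.List.pyGetD_natCast]
    rw [PySem.List.getD_map_range _ _ _ _ (by omega)]
    simp only [List.length_map, List.length_range]
    rw [show ((24:Nat):Int) = (24:Int) from by norm_num,
      show PySem.Int.floordiv 24 6 = 4 from by decide, if_neg (by simp)]
    rw [pvFoldConst, show (PySem.List.pyRange 4 24 1).length = 20 from rfl]
    dsimp only
    rw [show ((List.map (fun x => List.map (fun x_1 => bits.getD (x * 24 + x_1) "") (List.range 24))
            (List.range (bits.length / 24))).dropLast ++
          [List.map (fun x => bits.getD ((bits.length / 24 - 1) * 24 + x) "") (List.range 24) ++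
            List.replicate 20 "@"]).length = pvQ bits from by
        simp [pvQ, hr]; omega]
    rw [show pvPad bits = bits from by unfold pvPad; rw [if_pos hr]]
    apply pvRowsEq
    intro i hi m hm
    rw [show pvQ bits = bits.length / 24 from by unfold pvQ; rw [if_pos hr]; omega] at hi
    by_cases hlt : i < bits.length / 24 - 1
    · rw [List.getElem?_append_left (by simp; omega)]
      rw [List.getElem?_dropLast]
      simp only [List.length_map, List.length_range, hlt, if_pos, List.getElem?_map,
        List.getElem?_range (by omega : i < bits.length / 24), Option.map_some, Option.getD_some]
      rw [List.getElem?_range hm]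
      simp only [Option.map_some, Option.getD_some]
      rw [Nat.mul_comm]
    · have hieq : i = bits.length / 24 - 1 := by omega
      subst hieq
      rw [List.getElem?_append_right (by simp)]
      simp only [List.length_dropLast, List.length_map, List.length_range, Nat.sub_self,
        List.getElem?_cons_zero, Option.getD_some]
      rw [List.getElem?_append_left (by simp [hm]), List.getElem?_map, List.getElem?_range hm]
      simp only [Option.map_some, Option.getD_some]
      rw [Nat.mul_comm]
  · -- the partial chunk stays
    rw [if_neg (by simp; omega),
      show bits.length - bits.length / 24 * 24 = bits.length % 24 from by omega]
    simp only [difineGroupsInBytesOf3]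
    rw [show ((List.map (fun x => List.map (fun x_1 => bits.getD (x * 24 + x_1) "") (List.range 24))
            (List.range (bits.length / 24)) ++
          [List.map (fun x => bits.getD (bits.length / 24 * 24 + x) "") (List.range (bits.length % 24))]).length)
        = bits.length / 24 + 1 from by simp]
    rw [show ((bits.length / 24 + 1 : Nat) : Int) - 1 = ((bits.length / 24 : Nat) : Int) from by push_cast; ring]
    simp only [PySem.List.pyGetD_natCast]
    rw [List.getD_append_right _ _ _ _ (by simp)]
    simp only [List.length_map, List.length_range, Nat.sub_self, List.getD_cons_zero]
    rw [show PySem.Int.floordiv ((bits.length % 24 : Nat) : Int) 6 = ((bits.length % 24 / 6 : Nat) : Int) from by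
          exact_mod_cast PySem.Int.floordiv_natCast (bits.length % 24) 6]
    rw [if_pos (by omega : ((bits.length % 24 / 6 : Nat) : Int) ≠ 4)]
    by_cases hr6 : bits.length % 24 % 6 = 0
    · rw [if_neg (by omega : ¬(((bits.length % 24 : Nat) : Int) - 6 * ((bits.length % 24 / 6 : Nat) : Int) ≠ 0))]
      dsimp only
      simp only [List.length_map, List.length_range]
      rw [show (24:Int) = ((24:Nat):Int) from by norm_num,
        pvRangeOne (bits.length % 24) 24 (by omega), pvFoldConst]
      simp only [List.length_map, List.length_range, List.dropLast_concat]
      rw [show ((List.map (fun x => List.map (fun x_1 => bits.getD (x * 24 + x_1) "") (List.range 24))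
              (List.range (bits.length / 24)) ++
            [List.map (fun x => bits.getD (bits.length / 24 * 24 + x) "") (List.range (bits.length % 24)) ++
              List.replicate (24 - bits.length % 24) "@"]).length) = pvQ bits from by
          simp [pvQ, hr]]
      apply pvFinal bits _ hr
      have hdrop : List.map (fun x => bits.getD (bits.length / 24 * 24 + x) "") (List.range (bits.length % 24))
          = bits.drop (bits.length / 24 * 24) := by
        have hp := pvDropTakeMap bits "" (bits.length / 24 * 24) (bits.length % 24) (by omega)
        rw [List.take_of_length_le (by simp; omega)] at hp
        exact hp.symm
      rw [hdrop]
      unfold pvPad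
      rw [if_neg hr, show pvZ (bits.length % 24) = 0 from by unfold pvZ; omega]
      simp only [List.replicate_zero, List.append_nil, Nat.sub_zero]
      rw [show 24 * (bits.length / 24) = bits.length / 24 * 24 from Nat.mul_comm _ _,
        List.drop_append_of_le_length (by omega)]
    · rw [if_pos (by omega : ((bits.length % 24 : Nat) : Int) - 6 * ((bits.length % 24 / 6 : Nat) : Int) ≠ 0)]
      rw [show (6 * (((bits.length % 24 / 6 : Nat) : Int) + 1))
            = ((6 * (bits.length % 24 / 6) + 6 : Nat) : Int) from by push_cast; ring,
        pvRangeOne (bits.length % 24) (6 * (bits.length % 24 / 6) + 6) (by omega)]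
      simp only [pvFoldConst]
      simp only [List.length_map, List.length_range, List.length_append, List.length_replicate]
      rw [show bits.length % 24 + (6 * (bits.length % 24 / 6) + 6 - bits.length % 24)
            = 6 * (bits.length % 24 / 6) + 6 from by omega]
      rw [show (24:Int) = ((24:Nat):Int) from by norm_num,
        pvRangeOne (6 * (bits.length % 24 / 6) + 6) 24 (by omega)]
      simp only [List.length_map, List.length_range, List.dropLast_concat]
      rw [show ([List.map (fun x => bits.getD (bits.length / 24 * 24 + x) "") (List.range (bits.length % 24)) ++
              List.replicate (6 * (bits.length % 24 / 6) + 6 - bits.length % 24) "0" ++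
              List.replicate (24 - (6 * (bits.length % 24 / 6) + 6)) "@"].length) = 1 from rfl,
        show bits.length / 24 + 1 = pvQ bits from by simp [pvQ, hr]]
      apply pvFinal bits _ hr
      have hdrop : List.map (fun x => bits.getD (bits.length / 24 * 24 + x) "") (List.range (bits.length % 24))
          = bits.drop (bits.length / 24 * 24) := by
        have hp := pvDropTakeMap bits "" (bits.length / 24 * 24) (bits.length % 24) (by omega)
        rw [List.take_of_length_le (by simp; omega)] at hp
        exact hp.symm
      rw [hdrop]
      unfold pvPad
      rw [if_neg hr,
        show pvZ (bits.length % 24) = 6 * (bits.length % 24 / 6) + 6 - bits.length % 24 from by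
          unfold pvZ; omega,
        show 24 - bits.length % 24 - (6 * (bits.length % 24 / 6) + 6 - bits.length % 24)
            = 24 - (6 * (bits.length % 24 / 6) + 6) from by omega]
      rw [show 24 * (bits.length / 24) = bits.length / 24 * 24 from Nat.mul_comm _ _,
        List.drop_append_of_le_length (by simp; omega),
        List.drop_append_of_le_length (by omega)]
-- ===== VERDICT (by name: the statement is the Claim_ definition above) =====
theorem difineBytes_spec : Claim_equal_difineBytes := by
  intro bits _ hpre
  unfold Spec_difineBytes
  rw [pvAEq bits hpre, pvAltEq bits]
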